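-- pv_equiv track=rewrite | github.com/KikiSuho/ks-tools | packages/trellis/src/trellis/tracking/comparator.py | _split_paths
-- ===== SOURCE A (Python) =====
-- def _split_paths(paths: list[str]) -> tuple[list[str], list[str], list[str]]:
--     """
--     Split paths into packages, modules, and project file paths.
--
--     Parameters
--     ----------
--     paths : list[str]
--         All added or removed path keys.
--
--     Returns
--     -------
--     tuple[list[str], list[str], list[str]]
--         (packages, modules, files); packages are directories
--         (ending with ``/``), modules are ``.py`` files, and files
--         are everything else.
--
--     """
--     packages: list[str] = []
--     modules: list[str] = []
--     files: list[str] = []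
--     # Classify each path by its suffix into the appropriate category
--     for path in paths:
--         if path.endswith("/"):
--             # Directory paths are package entries
--             packages.append(path)
--         elif path.endswith(".py"):
--             # Python files are module entries
--             modules.append(path)
--         else:
--             # Everything else is a non-Python project file
--             files.append(path)
--     return packages, modules, files
-- ===== SOURCE B (Python) =====
-- def _split_paths(paths: list[str]) -> tuple[list[str], list[str], list[str]]:
--     """Three independent filtering passes instead of one if/elif/else loop."""
--     packages = [p for p in paths if p.endswith("/")]
--     modules = [p for p in paths if not p.endswith("/") and p.endswith(".py")]
--     files = [p for p in paths if not p.endswith("/") and not p.endswith(".py")]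
--     return packages, modules, files
-- ===== Notes on version B (the rewrite author's own statement) =====
-- stated objective: simpler
-- what changed: Replaces the single-pass if/elif/else loop with three append accumulators by three independent filter comprehensions, one per category.
import Mathlib
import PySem

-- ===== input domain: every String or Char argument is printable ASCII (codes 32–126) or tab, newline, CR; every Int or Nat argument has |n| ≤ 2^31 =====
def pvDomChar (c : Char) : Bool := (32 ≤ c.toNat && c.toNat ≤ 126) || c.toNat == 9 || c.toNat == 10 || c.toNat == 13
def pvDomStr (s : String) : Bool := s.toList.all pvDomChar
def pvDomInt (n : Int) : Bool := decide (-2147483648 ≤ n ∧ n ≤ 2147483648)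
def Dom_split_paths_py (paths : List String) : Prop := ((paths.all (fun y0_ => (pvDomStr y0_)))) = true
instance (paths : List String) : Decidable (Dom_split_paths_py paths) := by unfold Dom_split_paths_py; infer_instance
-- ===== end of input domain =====

-- B replaces A's single if/elif/else accumulation loop by three independent filter passes (objective: simpler).


-- ===== PORT A =====
-- one pass: classify each path into one of three accumulators, appending at the back
def split_paths_py (paths : List String) : List String × List String × List String :=
  paths.foldl
    (fun acc path =>
      if PySem.Str.endswith path "/" then (acc.1 ++ [path], acc.2.1, acc.2.2)
      else if PySem.Str.endswith path ".py" then (acc.1, acc.2.1 ++ [path], acc.2.2)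
      else (acc.1, acc.2.1, acc.2.2 ++ [path]))
    ([], [], [])

-- ===== PORT B =====
-- three independent filtering passes
def split_paths_py_alt (paths : List String) : List String × List String × List String :=
  (paths.filter (fun p => PySem.Str.endswith p "/"),
   paths.filter (fun p => !PySem.Str.endswith p "/" && PySem.Str.endswith p ".py"),
   paths.filter (fun p => !PySem.Str.endswith p "/" && !PySem.Str.endswith p ".py"))

-- ===== PRECONDITION & SPEC =====
def Spec_split_paths_py (paths : List String) (out : List String × List String × List String) : Prop := out = split_paths_py_alt paths
instance (paths : List String) (out : List String × List String × List String) : Decidable (Spec_split_paths_py paths out) := by unfold Spec_split_paths_py; infer_instance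

-- ===== CLAIM (what is proved, stated in full; the proofs are below) =====
def Claim_equal_split_paths_py : Prop := ∀ (paths : List String), Dom_split_paths_py paths → Spec_split_paths_py paths (split_paths_py paths)

-- ===== LEMMAS AND PROOFS =====

theorem split_fold_acc (paths : List String) (p m f : List String) :
    paths.foldl
      (fun acc path =>
        if PySem.Str.endswith path "/" then (acc.1 ++ [path], acc.2.1, acc.2.2)
        else if PySem.Str.endswith path ".py" then (acc.1, acc.2.1 ++ [path], acc.2.2)
        else (acc.1, acc.2.1, acc.2.2 ++ [path]))
      (p, m, f)
    = (p ++ paths.filter (fun x => PySem.Str.endswith x "/"),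
       m ++ paths.filter (fun x => !PySem.Str.endswith x "/" && PySem.Str.endswith x ".py"),
       f ++ paths.filter (fun x => !PySem.Str.endswith x "/" && !PySem.Str.endswith x ".py")) := by
  induction paths generalizing p m f with
  | nil => simp
  | cons hd tl ih =>
    rw [List.foldl_cons]
    by_cases h1 : PySem.Str.endswith hd "/" = true
    · rw [if_pos h1, ih]
      simp at h1
      simp [List.filter_cons, h1]
    · by_cases h2 : PySem.Str.endswith hd ".py" = true
      · rw [if_neg h1, if_pos h2, ih]
        simp at h1 h2
        simp [List.filter_cons, h1, h2]
      · rw [if_neg h1, if_neg h2, ih]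
        simp at h1 h2
        simp [List.filter_cons, h1, h2]

-- ===== VERDICT (by name: the statement is the Claim_ definition above) =====
theorem split_paths_py_spec : Claim_equal_split_paths_py := by
  intro paths _
  unfold Spec_split_paths_py split_paths_py split_paths_py_alt
  simpa using split_fold_acc paths [] [] []
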